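-- pv_equiv track=rewrite | github.com/hal0x/mcp_d | servers/memory-mcp/src/memory_mcp/analysis/summarization/session/utils/chat.py | map_profile
-- ===== SOURCE A (Python) =====
-- from typing import Any, Dict, List
--
-- def map_profile(chat_mode: str, messages: List[Dict[str, Any]]) -> str:
--     unique_authors = set()
--     for msg in messages:
--         author = msg.get("from") or {}
--         username = (
--             author.get("username") or author.get("display") or author.get("id")
--         )
--         if username:
--             unique_authors.add(str(username))
--     if len(unique_authors) <= 1 or chat_mode == "channel":
--         return "broadcast"
--     return "group-project"
-- ===== SOURCE B (Python) =====
-- def map_profile(chat_mode, messages):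
--     if chat_mode == "channel":
--         return "broadcast"
--     first = None
--     for msg in messages:
--         author = msg.get("from") or {}
--         username = author.get("username") or author.get("display") or author.get("id")
--         if not username:
--             continue
--         username = str(username)
--         if first is None:
--             first = username
--         elif username != first:
--             return "group-project"
--     return "broadcast"
-- ===== Notes on version B (the rewrite author's own statement) =====
-- stated objective: simpler
-- what changed: B drops the author set entirely: it returns 'broadcast' immediately for channel mode, then scans once keeping only the first non-empty author name and returns 'group-project' as soon as a second distinct name appears, instead of building the full set and counting it at the end.
import Mathlib
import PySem

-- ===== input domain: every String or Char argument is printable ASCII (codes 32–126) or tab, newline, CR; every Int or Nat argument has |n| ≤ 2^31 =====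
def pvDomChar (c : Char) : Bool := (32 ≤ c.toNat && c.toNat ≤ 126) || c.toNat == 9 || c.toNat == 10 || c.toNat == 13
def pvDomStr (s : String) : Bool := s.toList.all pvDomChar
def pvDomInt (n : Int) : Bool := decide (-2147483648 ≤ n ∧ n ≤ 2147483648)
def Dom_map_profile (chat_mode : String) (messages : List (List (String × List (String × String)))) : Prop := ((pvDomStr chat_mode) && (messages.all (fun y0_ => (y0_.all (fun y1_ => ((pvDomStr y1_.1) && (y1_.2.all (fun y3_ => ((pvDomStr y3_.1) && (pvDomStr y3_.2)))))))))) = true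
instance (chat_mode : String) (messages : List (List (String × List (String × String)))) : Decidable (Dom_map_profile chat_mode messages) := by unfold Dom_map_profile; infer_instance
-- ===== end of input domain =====

-- B replaces the author set by a single 'first author seen' variable with an early
-- return on the second distinct author (objective: simpler).

-- ===== PORT A =====
-- Python 'x or y' on optional strings: None and "" are falsy.
def pvOrStr (a b : Option String) : Option String :=
  match a with
  | some s => if s ≠ "" then some s else b
  | none => b

-- author = msg.get("from") or {};  username = author.get("username") or author.get("display") or author.get("id")
def pvUsername (msg : List (String × List (String × String))) : Option String :=
  let author : List (String × String) := PySem.Dict.getD (PySem.Dict.mk msg) "from" []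
  pvOrStr (pvOrStr (PySem.Dict.get? (PySem.Dict.mk author) "username") (PySem.Dict.get? (PySem.Dict.mk author) "display"))
    (PySem.Dict.get? (PySem.Dict.mk author) "id")

def map_profile (chat_mode : String) (messages : List (List (String × List (String × String)))) : String :=
  let unique_authors := messages.foldl
    (fun s msg =>
      match pvUsername msg with
      | some u => if u ≠ "" then PySem.Set.add s u else s    -- 'if username:' then add str(username)
      | none => s)
    (PySem.Set.empty : PySem.Set String)
  if PySem.Set.len unique_authors ≤ 1 || chat_mode == "channel" then "broadcast"
  else "group-project"

-- ===== PORT B =====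
-- the scan of Source B: 'first' is the first non-empty author name seen so far
def pvAltLoop (first : Option String) :
    List (List (String × List (String × String))) → String
  | [] => "broadcast"
  | msg :: rest =>
    match pvUsername msg with
    | none => pvAltLoop first rest                 -- if not username: continue
    | some u =>
      if u = "" then pvAltLoop first rest          -- "" is falsy too
      else
        match first with
        | none => pvAltLoop (some u) rest          -- first = username
        | some f => if u ≠ f then "group-project" else pvAltLoop (some f) rest

def map_profile_alt (chat_mode : String) (messages : List (List (String × List (String × String)))) : String :=
  if chat_mode == "channel" then "broadcast"
  else pvAltLoop none messages

-- ===== PRECONDITION & SPEC =====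
def Spec_map_profile (chat_mode : String) (messages : List (List (String × List (String × String)))) (out : String) : Prop := out = map_profile_alt chat_mode messages
instance (chat_mode : String) (messages : List (List (String × List (String × String)))) (out : String) : Decidable (Spec_map_profile chat_mode messages out) := by unfold Spec_map_profile; infer_instance

-- ===== CLAIM (what is proved, stated in full; the proofs are below) =====
def Claim_equal_map_profile : Prop := ∀ (chat_mode : String) (messages : List (List (String × List (String × String)))), Dom_map_profile chat_mode messages → Spec_map_profile chat_mode messages (map_profile chat_mode messages)

-- ===== LEMMAS AND PROOFS =====

-- the non-empty author name of a message, if any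
def pvName? (msg : List (String × List (String × String))) : Option String :=
  match pvUsername msg with
  | some u => if u = "" then none else some u
  | none => none

-- pure version of B's loop, over the extracted name list
def pvG : Option String → List String → String
  | _, [] => "broadcast"
  | none, u :: r => pvG (some u) r
  | some f, u :: r => if u ≠ f then "group-project" else pvG (some f) r

theorem pvAltLoop_eq_pvG (first : Option String)
    (msgs : List (List (String × List (String × String)))) :
    pvAltLoop first msgs = pvG first (msgs.filterMap pvName?) := by
  induction msgs generalizing first with
  | nil => rfl
  | cons m rest ih =>
    rw [List.filterMap_cons]
    cases h : pvUsername m with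
    | none =>
      have hn : pvName? m = none := by simp [pvName?, h]
      rw [hn]; simp only [pvAltLoop, h]; exact ih first
    | some u =>
      by_cases hu : u = ""
      · have hn : pvName? m = none := by simp [pvName?, h, hu]
        rw [hn]; simp only [pvAltLoop, h, if_pos hu]; exact ih first
      · have hn : pvName? m = some u := by simp [pvName?, h, hu]
        rw [hn]; simp only [pvAltLoop, h, if_neg hu]
        cases first with
        | none => simp only [pvG]; exact ih (some u)
        | some f =>
          by_cases hf : u = f
          · simp only [pvG, if_neg (by simp [hf] : ¬u ≠ f)]; exact ih (some f)
          · simp [pvG, hf]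

theorem pvG_some_broadcast (f : String) (l : List String) :
    pvG (some f) l = "broadcast" ↔ ∀ x ∈ l, x = f := by
  induction l with
  | nil => simp [pvG]
  | cons u r ih =>
    by_cases h : u = f
    · simp [pvG, h, ih]
    · simp [pvG, h]

theorem pvG_vals (first : Option String) (l : List String) :
    pvG first l = "broadcast" ∨ pvG first l = "group-project" := by
  induction l generalizing first with
  | nil => cases first <;> simp [pvG]
  | cons u r ih =>
    cases first with
    | none => exact ih (some u)
    | some f =>
      by_cases h : u = f
      · simpa [pvG, h] using ih (some f)
      · simp [pvG, h]

theorem pvA_fold_eq (msgs : List (List (String × List (String × String))))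
    (s : PySem.Set String) :
    msgs.foldl
      (fun s msg =>
        match pvUsername msg with
        | some u => if u ≠ "" then PySem.Set.add s u else s
        | none => s) s
      = List.foldl PySem.Set.add s (msgs.filterMap pvName?) := by
  induction msgs generalizing s with
  | nil => rfl
  | cons m rest ih =>
    rw [List.foldl_cons, List.filterMap_cons]
    cases h : pvUsername m with
    | none =>
      have hn : pvName? m = none := by simp [pvName?, h]
      rw [hn]; exact ih s
    | some u =>
      by_cases hu : u = ""
      · have hn : pvName? m = none := by simp [pvName?, h, hu]
        rw [hn]; simp only [if_neg (by simp [hu] : ¬u ≠ "")]; exact ih s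
      · have hn : pvName? m = some u := by simp [pvName?, h, hu]
        rw [hn]; simp only [if_pos (by simp [hu] : u ≠ "")]
        rw [List.foldl_cons]; exact ih (PySem.Set.add s u)

theorem pv_len_mono (l : List String) (s : PySem.Set String) :
    s.length ≤ (List.foldl PySem.Set.add s l).length := by
  induction l generalizing s with
  | nil => exact le_refl _
  | cons x r ih =>
    refine le_trans ?_ (ih (PySem.Set.add s x))
    by_cases h : x ∈ s
    · simp [PySem.Set.add_of_mem h]
    · simp [PySem.Set.add_of_not_mem h]

theorem pv_fold_len_le_one (r : List String) (u : String) :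
    (List.foldl PySem.Set.add [u] r).length ≤ 1 ↔ ∀ x ∈ r, x = u := by
  induction r with
  | nil => simp
  | cons x r' ih =>
    by_cases h : x = u
    · subst h
      have hm : PySem.Set.add [x] x = [x] := PySem.Set.add_of_mem (by simp)
      rw [List.foldl_cons, hm]; simpa using ih
    · have hadd : PySem.Set.add [u] x = [u, x] := PySem.Set.add_of_not_mem (by simpa using h)
      have h2 : 2 ≤ (List.foldl PySem.Set.add [u, x] r').length := pv_len_mono r' [u, x]
      constructor
      · intro hle
        simp only [List.foldl_cons, hadd] at hle
        omega
      · intro hall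
        exact absurd (hall x (by simp)) h

-- ===== VERDICT (by name: the statement is the Claim_ definition above) =====
theorem map_profile_spec : Claim_equal_map_profile := by
  intro chat_mode messages _
  unfold Spec_map_profile map_profile map_profile_alt
  rw [pvA_fold_eq, pvAltLoop_eq_pvG]
  by_cases hc : chat_mode == "channel"
  · simp [hc]
  · simp only [hc, Bool.or_false]
    cases hn : messages.filterMap pvName? with
    | nil => simp [PySem.Set.len, PySem.Set.empty, pvG]
    | cons u r =>
      have hadd : PySem.Set.add (PySem.Set.empty : PySem.Set String) u = [u] :=
        PySem.Set.add_of_not_mem (by simp [PySem.Set.empty])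
      simp only [List.foldl_cons, hadd, pvG]
      by_cases hall : ∀ x ∈ r, x = u
      · have h1 : (List.foldl PySem.Set.add [u] r).length ≤ 1 :=
          (pv_fold_len_le_one r u).mpr hall
        have h2 : pvG (some u) r = "broadcast" := (pvG_some_broadcast u r).mpr hall
        simp [PySem.Set.len, h1, h2]
      · have h1 : ¬ (List.foldl PySem.Set.add [u] r).length ≤ 1 := by
          intro hle; exact hall ((pv_fold_len_le_one r u).mp hle)
        have h2 : pvG (some u) r = "group-project" := by
          rcases pvG_vals (some u) r with hb | hg
          · exact absurd ((pvG_some_broadcast u r).mp hb) hall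
          · exact hg
        simp [PySem.Set.len, h1, h2]
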